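-- pv_equiv track=rewrite | github.com/heeone1/CodingTest | 프로그래머스/1/92334. 신고 결과 받기/신고 결과 받기.py | solution
-- ===== SOURCE A (Python) =====
-- def solution(id_list, report, k):
--     # 중복 제거
--     report = set(report)
--
--     # 신고 기록 분리(초기화)
--     reports = {user: [] for user in id_list}  # 각 유저가 누구를 신고했는지
--     counts = {user: 0 for user in id_list}    # 각 유저가 신고당한 횟수
--
--     for r in report:
--         a, b = r.split()     # "신고자 피신고자"
--         reports[a].append(b)
--         counts[b] += 1
--
--     # 정지된 사람들
--     stopped = {user for user, c in counts.items() if c >= k}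
--
--     # stopped = set() # 빈 집합 만들기 = set
--     # for user, c in counts.items():
--     #     if c >= k:
--     #         stopped.add(user)
--
--     # 각 유저별 메일 개수 계산
--     answer = []
--     for user in id_list:
--         total = 0
--         for target in reports[user]:
--             if target in stopped:
--                 total += 1
--         answer.append(total)
--
--     return answer
-- ===== SOURCE B (Python) =====
-- def solution(id_list, report, k):
--     rs = set(report)
--     counts = dict.fromkeys(id_list, 0)
--     for r in rs:
--         _, target = r.split()
--         counts[target] += 1
--     acc = dict.fromkeys(id_list, 0)
--     for r in rs:
--         reporter, target = r.split()
--         if counts[target] >= k: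
--             acc[reporter] += 1
--     return [acc[u] for u in id_list]
-- ===== Notes on version B (the rewrite author's own statement) =====
-- stated objective: simpler
-- what changed: B drops the per-user adjacency lists and the stopped set: it counts reports per target in one pass over the deduplicated reports, then in a second pass credits each reporter directly whenever the target's count reaches k, so the nested loop over stored target lists disappears.
import Mathlib
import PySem

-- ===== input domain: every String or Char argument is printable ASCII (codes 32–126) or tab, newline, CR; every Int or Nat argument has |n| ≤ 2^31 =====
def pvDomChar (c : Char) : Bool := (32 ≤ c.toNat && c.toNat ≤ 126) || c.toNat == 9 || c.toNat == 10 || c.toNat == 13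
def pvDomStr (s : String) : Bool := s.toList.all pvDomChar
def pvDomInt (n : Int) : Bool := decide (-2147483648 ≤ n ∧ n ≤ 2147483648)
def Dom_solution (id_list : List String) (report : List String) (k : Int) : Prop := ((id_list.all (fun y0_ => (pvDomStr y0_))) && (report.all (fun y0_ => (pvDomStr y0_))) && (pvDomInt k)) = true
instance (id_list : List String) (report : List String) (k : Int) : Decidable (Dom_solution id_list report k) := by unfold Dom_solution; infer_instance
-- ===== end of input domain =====

-- B drops the per-user target lists and the stopped set: two flat passes over the
-- deduplicated reports (count per target, then credit reporters directly); same values.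

-- ===== PORT A =====
def solution (id_list : List String) (report : List String) (k : Int) : List Int :=
  let rs : List String := PySem.Set.ofList report
  let reports0 : PySem.Dict String (List String) :=
    id_list.foldl (fun d u => d.insert u []) PySem.Dict.empty
  let counts0 : PySem.Dict String Int :=
    id_list.foldl (fun d u => d.insert u 0) PySem.Dict.empty
  let st := rs.foldl
    (fun (st : PySem.Dict String (List String) × PySem.Dict String Int) r =>
      match PySem.Str.split₀ r with
      | [a, b] => (st.1.modify a [] (fun l => l ++ [b]), st.2.modify b 0 (fun c => c + 1))
      | _ => st)   -- Python raises here (unpacking error / KeyError); such inputs are outside Pre_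
    (reports0, counts0)
  let stopped : PySem.Set String :=
    PySem.Set.ofList ((st.2.items.filter (fun p => decide (k ≤ p.2))).map (fun p => p.1))
  id_list.foldl (fun ans u =>
    ans ++ [(st.1.getD u []).foldl
      (fun total target => if PySem.Set.contains stopped target then total + 1 else total) 0]) []

-- ===== PORT B =====
-- B-side helper: the tuple unpacking  'a, b = r.split()'  (none exactly where Python raises ValueError)
def pairOf? (r : String) : Option (String × String) :=
  let ws := PySem.Str.split₀ r
  if h : ws.length = 2 then some (ws[0]'(by omega), ws[1]'(by omega)) else none

def solution_alt (id_list : List String) (report : List String) (k : Int) : List Int :=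
  let rs : List String := PySem.Set.ofList report
  let counts : PySem.Dict String Int :=
    rs.foldl (fun d r =>
      match pairOf? r with
      | some (_, b) => d.modify b 0 (fun c => c + 1)
      | none => d)   -- Python raises here (unpacking error / KeyError); outside Pre_
      (id_list.foldl (fun d u => d.insert u 0) PySem.Dict.empty)
  let acc : PySem.Dict String Int :=
    rs.foldl (fun d r =>
      match pairOf? r with
      | some (a, b) => if k ≤ counts.getD b 0 then d.modify a 0 (fun c => c + 1) else d
      | none => d)
      (id_list.foldl (fun d u => d.insert u 0) PySem.Dict.empty)
  id_list.map (fun u => acc.getD u 0)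

-- ===== PRECONDITION & SPEC =====
-- Pre_ excludes exactly the inputs where Python A raises: a report string that does not
-- split into exactly two whitespace-separated words, or one mentioning a user not in id_list
-- (unpacking ValueError / KeyError).
def Pre_solution (id_list : List String) (report : List String) (k : Int) : Prop :=
  ∀ r ∈ report, (PySem.Str.split₀ r).length = 2 ∧ ∀ x ∈ PySem.Str.split₀ r, x ∈ id_list
instance (id_list : List String) (report : List String) (k : Int) : Decidable (Pre_solution id_list report k) := by unfold Pre_solution; infer_instance

def pvWitness_solution : List String × List String × Int := (["muzi", "frodo", "apeach"], ["muzi frodo", "apeach muzi", "muzi frodo"], 1)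

def Spec_solution (id_list : List String) (report : List String) (k : Int) (out : List Int) : Prop := out = solution_alt id_list report k
instance (id_list : List String) (report : List String) (k : Int) (out : List Int) : Decidable (Spec_solution id_list report k out) := by unfold Spec_solution; infer_instance

-- ===== CLAIM (what is proved, stated in full; the proofs are below) =====
def Claim_equal_solution : Prop := ∀ (id_list : List String) (report : List String) (k : Int), Dom_solution id_list report k → Pre_solution id_list report k → Spec_solution id_list report k (solution id_list report k)

-- ===== LEMMAS AND PROOFS =====

theorem pairOf?_eq_some {r a b : String} (h : PySem.Str.split₀ r = [a, b]) :
    pairOf? r = some (a, b) := by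
  simp [pairOf?, h]

theorem pairOf?_eq_none {r : String} (h : (PySem.Str.split₀ r).length ≠ 2) :
    pairOf? r = none := by
  simp [pairOf?, h]

-- The second component of A's paired fold is exactly B's counts fold.
theorem snd_foldA (l : List String) (rd : PySem.Dict String (List String)) (cd : PySem.Dict String Int) :
    (l.foldl (fun st r =>
      match PySem.Str.split₀ r with
      | [a, b] => (st.1.modify a [] (fun l => l ++ [b]), st.2.modify b 0 (fun c => c + 1))
      | _ => st) (rd, cd)).2
    = l.foldl (fun d r =>
      match pairOf? r with
      | some (_, b) => d.modify b 0 (fun c => c + 1)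
      | none => d) cd := by
  induction l generalizing rd cd with
  | nil => rfl
  | cons r t ih =>
    simp only [List.foldl_cons]
    rcases h : PySem.Str.split₀ r with _ | ⟨a, _ | ⟨b, _ | ⟨c, t'⟩⟩⟩
    · rw [pairOf?_eq_none (by rw [h]; simp)]; exact ih rd cd
    · rw [pairOf?_eq_none (by rw [h]; simp)]; exact ih rd cd
    · rw [pairOf?_eq_some h]; exact ih _ _
    · rw [pairOf?_eq_none (by rw [h]; simp)]; exact ih rd cd

-- The first component of A's paired fold, as its own fold.
theorem fst_foldA (l : List String) (rd : PySem.Dict String (List String)) (cd : PySem.Dict String Int) :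
    (l.foldl (fun st r =>
      match PySem.Str.split₀ r with
      | [a, b] => (st.1.modify a [] (fun l => l ++ [b]), st.2.modify b 0 (fun c => c + 1))
      | _ => st) (rd, cd)).1
    = l.foldl (fun d r =>
      match PySem.Str.split₀ r with
      | [a, b] => d.modify a [] (fun l => l ++ [b])
      | _ => d) rd := by
  induction l generalizing rd cd with
  | nil => rfl
  | cons r t ih =>
    simp only [List.foldl_cons]
    rcases h : PySem.Str.split₀ r with _ | ⟨a, _ | ⟨b, _ | ⟨c, t'⟩⟩⟩ <;> simp [ih]

-- A dict built by inserting the same constant value for every key still looks up to that value.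
theorem getD_foldl_insert_const {ν : Type} (l : List String) (d : PySem.Dict String ν) (v : ν)
    (h : ∀ x, d.getD x v = v) (x : String) :
    (l.foldl (fun d u => d.insert u v) d).getD x v = v := by
  induction l generalizing d with
  | nil => exact h x
  | cons u t ih =>
    refine ih _ (fun y => ?_)
    by_cases hy : y = u
    · rw [hy]; exact PySem.Dict.getD_insert_self d u v v
    · rw [PySem.Dict.getD_insert_of_ne d v v hy]; exact h y

-- Every element of a per-reporter target list came from some report of the fold's input.
theorem mem_foldR (l : List String) (rd : PySem.Dict String (List String)) (u x : String)
    (hx : x ∈ (l.foldl (fun d r =>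
      match PySem.Str.split₀ r with
      | [a, b] => d.modify a [] (fun l => l ++ [b])
      | _ => d) rd).getD u []) :
    x ∈ rd.getD u [] ∨ ∃ r ∈ l, ∃ a, PySem.Str.split₀ r = [a, x] := by
  induction l generalizing rd with
  | nil => exact Or.inl hx
  | cons r t ih =>
    rw [List.foldl_cons] at hx
    have weaken : ∀ (hx' : x ∈ (t.foldl (fun (d : PySem.Dict String (List String)) r =>
        match PySem.Str.split₀ r with
        | [a, b] => d.modify a [] (fun l => l ++ [b])
        | _ => d) rd).getD u []),
        x ∈ rd.getD u [] ∨ ∃ r' ∈ r :: t, ∃ a, PySem.Str.split₀ r' = [a, x] := by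
      intro hx'
      rcases ih _ hx' with h1 | ⟨r', hr', a', ha⟩
      · exact Or.inl h1
      · exact Or.inr ⟨r', List.mem_cons_of_mem _ hr', a', ha⟩
    rcases h : PySem.Str.split₀ r with _ | ⟨a, _ | ⟨b, _ | ⟨c, t'⟩⟩⟩ <;> rw [h] at hx <;>
      dsimp only at hx
    · exact weaken hx
    · exact weaken hx
    · rcases ih _ hx with h1 | ⟨r', hr', a', ha⟩
      · rw [PySem.Dict.getD_modify] at h1
        by_cases hu : u = a
        · rw [if_pos hu] at h1
          rcases List.mem_append.1 h1 with h2 | h2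
          · rw [hu]; exact Or.inl h2
          · rcases List.mem_singleton.1 h2 with rfl
            exact Or.inr ⟨r, List.mem_cons_self, a, h⟩
        · rw [if_neg hu] at h1; exact Or.inl h1
      · exact Or.inr ⟨r', List.mem_cons_of_mem _ hr', a', ha⟩
    · exact weaken hx

-- Keys of the counts fold stay Nodup and contain every id.
theorem counts_keys (id_list : List String) (l : List String) :
    (l.foldl (fun (d : PySem.Dict String Int) r =>
      match pairOf? r with
      | some (_, b) => d.modify b 0 (fun c => c + 1)
      | none => d)
      (id_list.foldl (fun d u => d.insert u (0 : Int)) PySem.Dict.empty)).keys.Nodup ∧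
    ∀ b ∈ id_list, b ∈ (l.foldl (fun (d : PySem.Dict String Int) r =>
      match pairOf? r with
      | some (_, b) => d.modify b 0 (fun c => c + 1)
      | none => d)
      (id_list.foldl (fun d u => d.insert u (0 : Int)) PySem.Dict.empty)).keys := by
  have main : ∀ (l : List String) (d : PySem.Dict String Int), d.keys.Nodup →
      (∀ b ∈ id_list, b ∈ d.keys) →
      (l.foldl (fun (d : PySem.Dict String Int) r =>
        match pairOf? r with
        | some (_, b) => d.modify b 0 (fun c => c + 1)
        | none => d) d).keys.Nodup ∧
      ∀ b ∈ id_list, b ∈ (l.foldl (fun (d : PySem.Dict String Int) r =>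
        match pairOf? r with
        | some (_, b) => d.modify b 0 (fun c => c + 1)
        | none => d) d).keys := by
    intro l
    induction l with
    | nil => exact fun d h1 h2 => ⟨h1, h2⟩
    | cons r t ih =>
      intro d h1 h2
      rw [List.foldl_cons]
      rcases h : PySem.Str.split₀ r with _ | ⟨a, _ | ⟨b, _ | ⟨c, t'⟩⟩⟩
      · rw [pairOf?_eq_none (by rw [h]; simp)]; exact ih d h1 h2
      · rw [pairOf?_eq_none (by rw [h]; simp)]; exact ih d h1 h2
      · rw [pairOf?_eq_some h]
        dsimp only
        apply ih
        · rw [PySem.Dict.keys_modify]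
          exact PySem.Dict.nodup_keys_insert _ _ _ h1
        · intro y hy
          rw [PySem.Dict.keys_modify]
          exact (PySem.Dict.mem_keys_insert _ _ _ _).2 (Or.inr (h2 y hy))
      · rw [pairOf?_eq_none (by rw [h]; simp)]; exact ih d h1 h2
  have h0 : (id_list.foldl (fun (d : PySem.Dict String Int) u => d.insert u 0) PySem.Dict.empty).keys
      = PySem.Set.ofList id_list := by
    rw [PySem.Dict.keys_foldl_insert (f := fun _ _ => (0 : Int))]
    rfl
  refine main _ _ ?_ ?_
  · rw [h0]; exact PySem.Set.nodup_ofList id_list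
  · intro b hb; rw [h0]; exact (PySem.Set.mem_ofList id_list b).2 hb

-- Membership in A's stopped set is the direct count test, for any key of the dict.
theorem contains_stopped (cd : PySem.Dict String Int) (k : Int) (b : String)
    (hnd : cd.keys.Nodup) (hb : b ∈ cd.keys) :
    (PySem.Set.contains
      (PySem.Set.ofList ((cd.items.filter (fun p => decide (k ≤ p.2))).map (fun p => p.1))) b = true)
    ↔ k ≤ cd.getD b 0 := by
  have hc : cd.contains b = true := (PySem.Dict.contains_iff_mem_keys cd b).2 hb
  obtain ⟨c0, hc0⟩ : ∃ c, cd.get? b = some c := by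
    cases hget : cd.get? b with
    | none =>
      rw [PySem.Dict.get?_eq_none_iff_contains] at hget
      rw [hc] at hget; cases hget
    | some c => exact ⟨c, rfl⟩
  have hgetD : cd.getD b 0 = c0 := by
    rw [PySem.Dict.getD_eq_get?_getD, hc0]; rfl
  rw [PySem.Set.contains_iff, PySem.Set.mem_ofList]
  constructor
  · intro hmem
    rcases List.mem_map.1 hmem with ⟨p, hp, hpb⟩
    rcases List.mem_filter.1 hp with ⟨hpi, hpk⟩
    have hpget : cd.get? p.1 = some p.2 :=
      (PySem.Dict.get?_eq_some_iff_mem_items cd p.1 p.2 hnd).2 (by cases p; exact hpi)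
    rw [hpb, hc0] at hpget
    have hp2 : c0 = p.2 := by injection hpget
    rw [hgetD, hp2]
    exact of_decide_eq_true hpk
  · intro hk
    refine List.mem_map.2 ⟨(b, c0), List.mem_filter.2 ⟨?_, ?_⟩, rfl⟩
    · exact (PySem.Dict.get?_eq_some_iff_mem_items cd b c0 hnd).1 hc0
    · exact decide_eq_true (by rw [hgetD] at hk; exact hk)

-- Main invariant: B's accumulator tracks the stopped-count of A's per-reporter lists.
theorem inv_acc (k : Int) (cd : PySem.Dict String Int) (l : List String)
    (rd : PySem.Dict String (List String)) (ad : PySem.Dict String Int) (u : String) :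
    (l.foldl (fun d r =>
      match pairOf? r with
      | some (a, b) => if k ≤ cd.getD b 0 then d.modify a 0 (fun c => c + 1) else d
      | none => d) ad).getD u 0
    = ad.getD u 0
      + (((l.foldl (fun d r =>
          match PySem.Str.split₀ r with
          | [a, b] => d.modify a [] (fun l => l ++ [b])
          | _ => d) rd).getD u []).countP (fun b => decide (k ≤ cd.getD b 0)) : Int)
      - ((rd.getD u []).countP (fun b => decide (k ≤ cd.getD b 0)) : Int) := by
  induction l generalizing rd ad with
  | nil => simp
  | cons r t ih =>
    rw [List.foldl_cons, List.foldl_cons]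
    rcases h : PySem.Str.split₀ r with _ | ⟨a, _ | ⟨b, _ | ⟨c, t'⟩⟩⟩
    · rw [pairOf?_eq_none (by rw [h]; simp)]; exact ih rd ad
    · rw [pairOf?_eq_none (by rw [h]; simp)]; exact ih rd ad
    · rw [pairOf?_eq_some h]
      dsimp only
      by_cases hkb : k ≤ cd.getD b 0
      · rw [if_pos hkb, ih (rd.modify a [] (fun l => l ++ [b])) (ad.modify a 0 (fun c => c + 1)),
            PySem.Dict.getD_modify, PySem.Dict.getD_modify]
        by_cases hu : u = a
        · subst hu
          simp only [if_true]
          rw [show List.countP (fun b => decide (k ≤ cd.getD b 0)) (rd.getD u [] ++ [b])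
              = List.countP (fun b => decide (k ≤ cd.getD b 0)) (rd.getD u []) + 1 from by
            simp [List.countP_append, hkb]]
          push_cast
          ring
        · rw [if_neg hu, if_neg hu]
      · rw [if_neg hkb, ih (rd.modify a [] (fun l => l ++ [b])) ad, PySem.Dict.getD_modify]
        by_cases hu : u = a
        · subst hu
          simp only [if_true]
          rw [show List.countP (fun b => decide (k ≤ cd.getD b 0)) (rd.getD u [] ++ [b])
              = List.countP (fun b => decide (k ≤ cd.getD b 0)) (rd.getD u []) from by
            simp [List.countP_append, hkb]]
        · rw [if_neg hu]
    · rw [pairOf?_eq_none (by rw [h]; simp)]; exact ih rd ad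

-- ===== VERDICT (by name: the statement is the Claim_ definition above) =====
theorem solution_spec : Claim_equal_solution := by
  intro id_list report k _ hpre
  unfold Spec_solution solution solution_alt
  simp only [fst_foldA, snd_foldA, PySem.List.foldl_append_singleton_eq_map, List.nil_append]
  apply List.map_congr_left
  intro u hu
  rw [PySem.List.foldl_count_if]
  rw [inv_acc k _ (PySem.Set.ofList report)
    (id_list.foldl (fun d u => d.insert u []) PySem.Dict.empty)
    (id_list.foldl (fun d u => d.insert u 0) PySem.Dict.empty) u]
  rw [getD_foldl_insert_const id_list PySem.Dict.empty ([] : List String) (fun _ => rfl) u]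
  rw [getD_foldl_insert_const id_list PySem.Dict.empty (0 : Int) (fun _ => rfl) u]
  simp only [List.countP_nil, Nat.cast_zero, sub_zero, zero_add]
  congr 1
  apply List.countP_congr
  intro x hx
  rcases mem_foldR (PySem.Set.ofList report)
      (id_list.foldl (fun d u => d.insert u []) PySem.Dict.empty) u x hx with h1 | ⟨r, hr, a, ha⟩
  · rw [getD_foldl_insert_const id_list PySem.Dict.empty ([] : List String) (fun _ => rfl) u] at h1
    cases h1
  · have hrep : r ∈ report := (PySem.Set.mem_ofList report r).1 hr
    have hxid : x ∈ id_list := by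
      have := (hpre r hrep).2 x
      rw [ha] at this
      exact this (by simp)
    rcases counts_keys id_list (PySem.Set.ofList report) with ⟨hnd, hmem⟩
    have := contains_stopped _ k x hnd (hmem x hxid)
    rw [Bool.eq_iff_iff, this]
    simp
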